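-- pv_equiv track=rewrite | github.com/Luominai/midi-from-youtube | keyboard_parser2.py | sort_layers
-- ===== SOURCE A (Python) =====
-- def sort_layers(layers):
--     terrain_by_octave_and_note = []
--
--     for [valleys, plateaus, full_survey] in layers:
--         for idx, (start, end, y_pos, is_valley, note, octave) in enumerate(full_survey):
--             if len(terrain_by_octave_and_note) <= octave:
--                 for i in range(octave - len(terrain_by_octave_and_note) + 1):
--                     terrain_by_octave_and_note.append({})
--
--             if note not in terrain_by_octave_and_note[octave]:
--                 terrain_by_octave_and_note[octave][note] = []
--
--             terrain_by_octave_and_note[octave][note].append(full_survey[idx])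
--
--     return terrain_by_octave_and_note
-- ===== SOURCE B (Python) =====
-- def sort_layers(layers):
--     entries = [e for _valleys, _plateaus, full_survey in layers for e in full_survey]
--     if not entries:
--         return []
--     top = max(e[5] for e in entries)
--     result = []
--     for octave in range(top + 1):
--         group = {}
--         for e in entries:
--             if e[5] == octave:
--                 group.setdefault(e[4], []).append(e)
--         result.append(group)
--     return result
-- ===== Notes on version B (the rewrite author's own statement) =====
-- stated objective: alternative
-- what changed: B replaces A's single-pass grow-a-list-of-dicts-while-mutating loop by staged passes: flatten all entries, compute the maximum octave, then materialise each octave's dict independently by filtering the flat entry list for that octave; it trades A's one-pass in-place growth for per-octave re-scans (O(n*max_octave)).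
-- outside the precondition, e.g. on sort_layers([([], [], [(0, 0, 0, False, 'C', -1)])]): A raises IndexError, B returns []
import Mathlib
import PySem

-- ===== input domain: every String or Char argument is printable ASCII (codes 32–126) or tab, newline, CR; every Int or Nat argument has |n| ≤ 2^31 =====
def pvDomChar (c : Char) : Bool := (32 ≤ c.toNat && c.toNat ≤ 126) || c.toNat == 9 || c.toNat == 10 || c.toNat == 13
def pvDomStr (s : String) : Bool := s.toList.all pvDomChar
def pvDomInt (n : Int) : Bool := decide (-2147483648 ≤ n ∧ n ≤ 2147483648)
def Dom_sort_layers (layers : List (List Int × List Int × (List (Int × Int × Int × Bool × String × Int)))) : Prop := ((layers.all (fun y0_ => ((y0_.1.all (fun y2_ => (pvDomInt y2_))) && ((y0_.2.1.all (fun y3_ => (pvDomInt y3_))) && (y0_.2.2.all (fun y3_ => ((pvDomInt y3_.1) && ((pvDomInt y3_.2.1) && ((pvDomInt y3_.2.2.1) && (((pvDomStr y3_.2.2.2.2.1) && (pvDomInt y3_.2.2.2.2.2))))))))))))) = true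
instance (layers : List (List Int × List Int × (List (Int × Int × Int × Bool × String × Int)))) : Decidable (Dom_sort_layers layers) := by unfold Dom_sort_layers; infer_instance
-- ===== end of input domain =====

-- B replaces A's grow-the-list-while-mutating single pass by staged passes: flatten the entries,
-- take the maximum octave, then build each octave's dict by filtering the flat list; objective: alternative.

abbrev PvEntry : Type := Int × Int × Int × Bool × String × Int

-- ===== PORT A =====
-- one iteration of A's inner 'for idx, (...) in enumerate(full_survey)' body
def pvStepA (fs : List PvEntry) (st : List (PySem.Dict String (List PvEntry)))
    (ie : Int × PvEntry) : List (PySem.Dict String (List PvEntry)) :=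
  match ie with
  | (idx, (_start, _end, _y, _v, note, octave)) =>
    -- if len(terrain) <= octave: for i in range(octave - len(terrain) + 1): terrain.append({})
    let st1 := if (st.length : Int) ≤ octave then
        (PySem.List.pyRange 0 (octave - (st.length : Int) + 1) 1).foldl
          (fun a _ => a ++ [PySem.Dict.empty]) st
      else st
    -- d = terrain[octave]  (total form pyGetD; Pre_ keeps the index in range)
    let d := PySem.List.pyGetD st1 octave PySem.Dict.empty
    -- if note not in d: d[note] = []
    let d := if d.contains note then d else d.insert note []
    -- x = full_survey[idx]  (idx comes from enumerate, always in range)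
    let x := PySem.List.pyGetD fs idx (0, 0, 0, false, "", 0)
    -- d[note].append(x)
    let d := d.modify note [] (· ++ [x])
    PySem.List.pySetD st1 octave d

def sort_layers (layers : List (List Int × List Int × (List (Int × Int × Int × Bool × String × Int)))) : List (List (String × List (Int × Int × Int × Bool × String × Int))) :=
  (layers.foldl
      (fun st layer => (PySem.List.enumerate layer.2.2).foldl (pvStepA layer.2.2) st)
      []).map (fun d => d.items)

-- ===== PORT B =====
-- B's inner-loop body: 'if e[5] == octave: group.setdefault(e[4], []).append(e)'
def pvFilt (o : Int) (g : PySem.Dict String (List PvEntry)) (e : PvEntry) :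
    PySem.Dict String (List PvEntry) :=
  if e.2.2.2.2.2 == o then g.modify e.2.2.2.2.1 [] (· ++ [e]) else g

def sort_layers_alt (layers : List (List Int × List Int × (List (Int × Int × Int × Bool × String × Int)))) : List (List (String × List (Int × Int × Int × Bool × String × Int))) :=
  -- entries = [e for _, _, full_survey in layers for e in full_survey]
  let entries := layers.flatMap (fun l => l.2.2)
  -- if not entries: return []
  if entries.isEmpty then [] else
  -- top = max(e[5] for e in entries)
  let top := (PySem.List.max? (entries.map (fun e => e.2.2.2.2.2)) (fun y => y)).getD 0
  -- for octave in range(top + 1): build group by one filtering scan of entries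
  (PySem.List.pyRange 0 (top + 1) 1).map (fun o =>
    (entries.foldl (pvFilt o) PySem.Dict.empty).items)

-- ===== PRECONDITION & SPEC =====
-- Pre_ restricts to non-negative octaves (the natural domain of octave numbers): on a negative
-- octave A either raises IndexError or silently files the entry under a wrong octave through
-- Python's negative-index wraparound, while B drops octaves it never materialises.
def Pre_sort_layers (layers : List (List Int × List Int × (List (Int × Int × Int × Bool × String × Int)))) : Prop :=
  ∀ layer ∈ layers, ∀ e ∈ layer.2.2, 0 ≤ e.2.2.2.2.2
instance (layers : List (List Int × List Int × (List (Int × Int × Int × Bool × String × Int)))) : Decidable (Pre_sort_layers layers) := by unfold Pre_sort_layers; infer_instance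

def pvWitness_sort_layers : (List (List Int × List Int × (List (Int × Int × Int × Bool × String × Int)))) :=
  [([1], [2], [(0, 4, 7, true, "C", 0), (5, 9, 2, false, "D", 2), (10, 12, 3, true, "C", 0)])]

def Spec_sort_layers (layers : List (List Int × List Int × (List (Int × Int × Int × Bool × String × Int)))) (out : List (List (String × List (Int × Int × Int × Bool × String × Int)))) : Prop := out = sort_layers_alt layers
instance (layers : List (List Int × List Int × (List (Int × Int × Int × Bool × String × Int)))) (out : List (List (String × List (Int × Int × Int × Bool × String × Int)))) : Decidable (Spec_sort_layers layers out) := by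
  unfold Spec_sort_layers
  have h1 : DecidableEq (Int × Int × Int × Bool × String × Int) := inferInstance
  have h2 : DecidableEq (List (Int × Int × Int × Bool × String × Int)) := @instDecidableEqList _ h1
  have h3 : DecidableEq (String × List (Int × Int × Int × Bool × String × Int)) := @instDecidableEqProd _ _ _ h2
  have h4 : DecidableEq (List (String × List (Int × Int × Int × Bool × String × Int))) := @instDecidableEqList _ h3
  exact @instDecidableEqList _ h4 _ _

-- ===== CLAIM (what is proved, stated in full; the proofs are below) =====
def Claim_equal_sort_layers : Prop := ∀ (layers : List (List Int × List Int × (List (Int × Int × Int × Bool × String × Int)))), Dom_sort_layers layers → Pre_sort_layers layers → Spec_sort_layers layers (sort_layers layers)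

-- ===== LEMMAS AND PROOFS =====

-- A's inner step with the enumerate bookkeeping resolved: the appended element is the entry itself
def pvStepA' (st : List (PySem.Dict String (List PvEntry))) (e : PvEntry) :
    List (PySem.Dict String (List PvEntry)) :=
  match e with
  | (_start, _end, _y, _v, note, octave) =>
    let st1 := if (st.length : Int) ≤ octave then
        (PySem.List.pyRange 0 (octave - (st.length : Int) + 1) 1).foldl
          (fun a _ => a ++ [PySem.Dict.empty]) st
      else st
    let d := PySem.List.pyGetD st1 octave PySem.Dict.empty
    let d := if d.contains note then d else d.insert note []
    let d := d.modify note [] (· ++ [e])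
    PySem.List.pySetD st1 octave d

-- running maximum octave (−1 when no entries), per-octave filtered group, and B's materialisation
def pvMaxO (es : List PvEntry) : Int := es.foldl (fun a e => max a e.2.2.2.2.2) (-1)

def pvGrp (es : List PvEntry) (o : Int) : PySem.Dict String (List PvEntry) :=
  es.foldl (pvFilt o) PySem.Dict.empty

def pvF (es : List PvEntry) : List (PySem.Dict String (List PvEntry)) :=
  (PySem.List.pyRange 0 (pvMaxO es + 1) 1).map (fun o => pvGrp es o)

lemma pv_enum_get {α : Type} (fs : List α) :
    ∀ (s : Int) (p : Int × α), p ∈ PySem.List.enumerate fs s →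
      ∃ k : Nat, p.1 = s + k ∧ fs[k]? = some p.2 := by
  induction fs with
  | nil => intro s p h; simp [PySem.List.enumerate_nil] at h
  | cons x xs ih =>
    intro s p h
    rw [PySem.List.enumerate_cons] at h
    rcases List.mem_cons.mp h with h | h
    · exact ⟨0, by simp [h]⟩
    · obtain ⟨k, hk1, hk2⟩ := ih (s + 1) p h
      exact ⟨k + 1, by push_cast; omega, by simpa using hk2⟩

lemma pv_foldl_enum (fs : List PvEntry) (st : List (PySem.Dict String (List PvEntry))) :
    (PySem.List.enumerate fs).foldl (pvStepA fs) st = fs.foldl pvStepA' st := by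
  have h : (PySem.List.enumerate fs).foldl (pvStepA fs) st
      = (PySem.List.enumerate fs).foldl (fun acc p => pvStepA' acc p.2) st := by
    apply PySem.List.foldl_congr_mem
    intro acc p hp
    obtain ⟨k, hk1, hk2⟩ := pv_enum_get fs 0 p hp
    obtain ⟨idx, e⟩ := p
    obtain ⟨a, b, c, v, note, octave⟩ := e
    simp only at hk1
    simp only [pvStepA, pvStepA']
    have : PySem.List.pyGetD fs idx (0, 0, 0, false, "", 0) = (a, b, c, v, note, octave) := by
      subst hk1
      rw [show ((0 : Int) + (k : Int)) = (k : Int) by omega, PySem.List.pyGetD_natCast]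
      simp [List.getD, hk2]
    rw [this]
  rw [h]
  have h2 : fs.foldl pvStepA' st
      = ((PySem.List.enumerate fs).map Prod.snd).foldl pvStepA' st := by
    rw [PySem.List.map_snd_enumerate]
  rw [h2, List.foldl_map]

lemma pv_foldl_max_init_le (es : List PvEntry) :
    ∀ a : Int, a ≤ es.foldl (fun x e => max x e.2.2.2.2.2) a := by
  induction es with
  | nil => intro a; simp
  | cons e es ih =>
    intro a
    simp only [List.foldl_cons]
    exact le_trans (le_max_left a e.2.2.2.2.2) (ih _)

lemma pv_mem_le_foldl_max (es : List PvEntry) :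
    ∀ (a : Int) (e : PvEntry), e ∈ es → e.2.2.2.2.2 ≤ es.foldl (fun x e => max x e.2.2.2.2.2) a := by
  induction es with
  | nil => intro a e h; simp at h
  | cons x xs ih =>
    intro a e h
    simp only [List.foldl_cons]
    rcases List.mem_cons.mp h with h | h
    · subst h
      exact le_trans (le_max_right a e.2.2.2.2.2) (pv_foldl_max_init_le xs _)
    · exact ih _ e h

lemma pv_maxO_ge (es : List PvEntry) : -1 ≤ pvMaxO es := pv_foldl_max_init_le es (-1)

lemma pv_maxO_append (es : List PvEntry) (e : PvEntry) :
    pvMaxO (es ++ [e]) = max (pvMaxO es) e.2.2.2.2.2 := by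
  simp [pvMaxO, List.foldl_append]

lemma pv_grp_append (es : List PvEntry) (e : PvEntry) (o : Int) :
    pvGrp (es ++ [e]) o = pvFilt o (pvGrp es o) e := by
  simp [pvGrp, List.foldl_append]

-- an octave above every entry's octave collects nothing
lemma pv_grp_empty (es : List PvEntry) (o : Int)
    (h : ∀ e ∈ es, e.2.2.2.2.2 ≠ o) : pvGrp es o = PySem.Dict.empty := by
  unfold pvGrp
  induction es with
  | nil => rfl
  | cons x xs ih =>
    simp only [List.foldl_cons]
    have hx : pvFilt o PySem.Dict.empty x = PySem.Dict.empty := by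
      unfold pvFilt
      rw [if_neg (by simpa using h x (List.mem_cons_self))]
    rw [hx]
    exact ih (fun e he => h e (List.mem_cons_of_mem _ he))

lemma pv_grp_gt_max (es : List PvEntry) (o : Int) (h : pvMaxO es < o) :
    pvGrp es o = PySem.Dict.empty := by
  apply pv_grp_empty
  intro e he hc
  have := pv_mem_le_foldl_max es (-1) e he
  unfold pvMaxO at h
  omega

lemma pv_length_pvF (es : List PvEntry) : (pvF es).length = (pvMaxO es + 1).toNat := by
  simp [pvF, PySem.List.length_pyRange_one]

lemma pv_getElem_pvF (es : List PvEntry) (k : Nat) (hk : k < (pvF es).length) :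
    (pvF es)[k] = pvGrp es (k : Int) := by
  simp only [pvF, List.getElem_map, PySem.List.getElem_pyRange_one, zero_add]

-- the per-entry step lemma: A's step on B's materialised state appends/updates the right octave
lemma pv_step (es : List PvEntry) (e : PvEntry) (he : 0 ≤ e.2.2.2.2.2) :
    pvStepA' (pvF es) e = pvF (es ++ [e]) := by
  obtain ⟨a, b, c, v, note, q⟩ := e
  simp only at he
  have ht := pv_maxO_ge es
  set t := pvMaxO es with hT
  have hlen : ((pvF es).length : Int) = t + 1 := by
    rw [pv_length_pvF]; omega
  have hmax : pvMaxO (es ++ [(a, b, c, v, note, q)]) = max t q := pv_maxO_append es _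
  simp only [pvStepA']
  -- the grown list st1 materialises pvGrp es over the extended range
  have hst1 : (if ((pvF es).length : Int) ≤ q then
      (PySem.List.pyRange 0 (q - ((pvF es).length : Int) + 1) 1).foldl
        (fun a _ => a ++ [PySem.Dict.empty]) (pvF es)
    else pvF es) = (PySem.List.pyRange 0 (max t q + 1) 1).map (fun o => pvGrp es o) := by
    rw [hlen]
    by_cases hc : t + 1 ≤ q
    · rw [if_pos hc]
      rw [PySem.List.foldl_append_singleton_eq_map]
      unfold pvF
      rw [PySem.List.pyRange_one_append 0 (t + 1) (max t q + 1) (by omega) (by omega),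
        List.map_append]
      congr 1
      have h2 : List.map (fun o => pvGrp es o) (PySem.List.pyRange (t + 1) (max t q + 1) 1)
          = List.map (fun _ => PySem.Dict.empty) (PySem.List.pyRange (t + 1) (max t q + 1) 1) := by
        apply List.map_congr_left
        intro x hx
        rw [PySem.List.mem_pyRange_one] at hx
        exact pv_grp_gt_max es x (by omega)
      rw [h2, List.map_const', List.map_const']
      congr 1
      simp [PySem.List.length_pyRange_one]
      omega
    · rw [if_neg hc]
      unfold pvF
      congr 2
      omega
  rw [hst1]
  have hq : q ≤ max t q := le_max_right t q
  have hget : PySem.List.pyGetD ((PySem.List.pyRange 0 (max t q + 1) 1).map (fun o => pvGrp es o))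
      q PySem.Dict.empty = pvGrp es q := by
    rw [PySem.List.pyGetD_eq_getElem _ _ he
      (by simp only [List.length_map, PySem.List.length_pyRange_one]; omega)]
    simp only [List.getElem_map, PySem.List.getElem_pyRange_one, zero_add]
    rw [Int.toNat_of_nonneg he]
  rw [hget]
  set d := pvGrp es q with hd
  -- A's dict update equals pvFilt q d e  (modify k dflt f = insert k (f (getD k dflt)))
  have hdict : ((if d.contains note then d else d.insert note []).modify note []
      (· ++ [(a, b, c, v, note, q)])) = pvFilt q d (a, b, c, v, note, q) := by
    have htarget : pvFilt q d (a, b, c, v, note, q)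
        = d.modify note [] (· ++ [(a, b, c, v, note, q)]) := by
      unfold pvFilt; simp
    rw [htarget]
    by_cases hcn : d.contains note
    · rw [if_pos hcn]
    · rw [if_neg hcn]
      show (d.insert note []).insert note
          ((d.insert note []).getD note [] ++ [(a, b, c, v, note, q)])
        = d.insert note (d.getD note [] ++ [(a, b, c, v, note, q)])
      rw [PySem.Dict.insert_insert_self, PySem.Dict.getD_insert_self,
        PySem.Dict.getD_of_not_contains _ _ (by simpa using hcn)]
  rw [hdict]
  -- writing back at index q gives pvF (es ++ [e])
  apply List.ext_getElem
  · simp only [PySem.List.pySetD_of_nonneg _ _ he, List.length_set, List.length_map,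
      PySem.List.length_pyRange_one, pv_length_pvF, hmax]
    omega
  · intro k h1 h2
    have hklen : k < ((PySem.List.pyRange 0 (max t q + 1) 1).map (fun o => pvGrp es o)).length := by
      simpa [PySem.List.pySetD_of_nonneg _ _ he] using h1
    have hkmax : (k : Int) < max t q + 1 := by
      simp [PySem.List.length_pyRange_one] at hklen; omega
    simp only [PySem.List.pySetD_of_nonneg _ _ he, List.getElem_set]
    rw [pv_getElem_pvF _ _ h2]
    by_cases hk : q.toNat = k
    · rw [if_pos hk]
      have hkq : (k : Int) = q := by omega
      rw [hkq, pv_grp_append]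
    · rw [if_neg hk]
      simp only [List.getElem_map, PySem.List.getElem_pyRange_one, zero_add]
      rw [pv_grp_append]
      unfold pvFilt
      rw [if_neg (by simp; omega)]

lemma pv_fold_entries (es : List PvEntry) (hpre : ∀ e ∈ es, 0 ≤ e.2.2.2.2.2) :
    es.foldl pvStepA' [] = pvF es := by
  induction es using List.reverseRecOn with
  | nil => simp [pvF, pvMaxO, PySem.List.pyRange_one_eq_nil]
  | append_singleton es e ih =>
    rw [List.foldl_append, List.foldl_cons, List.foldl_nil,
      ih (fun x hx => hpre x (List.mem_append_left _ hx)),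
      pv_step es e (hpre e (List.mem_append_right _ (List.mem_cons_self)))]

-- B's max(...) equals pvMaxO on a nonempty list of nonnegative octaves
lemma pv_top_eq (es : List PvEntry) (hne : es ≠ []) (hpre : ∀ e ∈ es, 0 ≤ e.2.2.2.2.2) :
    (PySem.List.max? (es.map (fun e => e.2.2.2.2.2)) (fun y => y)).getD 0 = pvMaxO es := by
  obtain ⟨x, t, rfl⟩ := List.exists_cons_of_ne_nil hne
  simp only [List.map_cons, PySem.List.max?_id_cons, Option.getD_some]
  rw [List.foldl_map]
  unfold pvMaxO
  simp only [List.foldl_cons]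
  congr 1
  have := hpre x (List.mem_cons_self)
  omega

-- ===== VERDICT (by name: the statement is the Claim_ definition above) =====
theorem sort_layers_spec : Claim_equal_sort_layers := by
  intro layers _hdom hpre
  unfold Spec_sort_layers sort_layers sort_layers_alt
  have hA : layers.foldl
      (fun st layer => (PySem.List.enumerate layer.2.2).foldl (pvStepA layer.2.2) st) []
      = layers.foldl (fun st layer => layer.2.2.foldl pvStepA' st) [] := by
    apply PySem.List.foldl_congr_mem
    intro st layer _
    exact pv_foldl_enum layer.2.2 st
  rw [hA]
  rw [show (layers.foldl (fun st layer => layer.2.2.foldl pvStepA' st) [] :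
      List (PySem.Dict String (List PvEntry)))
      = (layers.flatMap (fun l => l.2.2)).foldl pvStepA' [] from (List.foldl_flatMap).symm]
  set es := layers.flatMap (fun l => l.2.2) with hes
  have hpre' : ∀ e ∈ es, 0 ≤ e.2.2.2.2.2 := by
    intro e he
    obtain ⟨layer, hl, he'⟩ := List.mem_flatMap.mp he
    exact hpre layer hl e he'
  rw [pv_fold_entries es hpre']
  by_cases hne : es.isEmpty
  · rw [if_pos hne]
    have : es = [] := List.isEmpty_iff.mp hne
    simp [this, pvF, pvMaxO, PySem.List.pyRange_one_eq_nil]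
  · rw [if_neg hne]
    rw [pv_top_eq es (by simpa using hne) hpre']
    simp only [pvF, List.map_map]
    rfl
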